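-- pv_equiv track=rewrite | github.com/Aman-Godara/Programming_Problems | Array/Smallest Possible Number from DI Pattern.py | findNextLocalMinimaMaxima
-- ===== SOURCE A (Python) =====
-- def findNextLocalMinimaMaxima(start, pattern):
--     minima = start
--     maxima = len(pattern) + 1
--
--     for i in range(start, len(pattern)):
--         p = pattern[i]
--         if p == "D":
--             minima = i + 1
--         if p == "I":
--             maxima = i + 1
--             break
--
--
--     for i in range(maxima, len(pattern)):
--         p = pattern[i]
--         if p == "I":
--             maxima = i + 1
--         if p == "D":
--             break
--
--     return (minima, maxima)
-- ===== SOURCE B (Python) =====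
-- def findNextLocalMinimaMaxima(start, pattern):
--     n = len(pattern)
--     s = max(start, 0)
--     j = pattern.find('I', s)
--     if j == -1:
--         d = pattern.rfind('D', s)
--         return (s if d == -1 else d + 1, n + 1)
--     d = pattern.rfind('D', s, j)
--     minima = s if d == -1 else d + 1
--     m = pattern.find('D', j)
--     if m == -1:
--         m = n
--     k = pattern.rfind('I', j, m)
--     return (minima, k + 1)
-- ===== Notes on version B (the rewrite author's own statement) =====
-- stated objective: simpler
-- what changed: Replaces A's two index loops with their running minima/maxima accumulators and break flags by direct str.find/str.rfind searches for the transition positions (start clamped to 0); the C-level string searches give a large constant-factor speedup.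
-- intended difference: For -len(pattern) <= start < 0, A scans through Python's negative-index wraparound and returns indices derived from the raw negative counter (e.g. (-1, 0) on start=-2, pattern='DI'); B clamps start to 0 and returns the actual transition indices ((1, 2) there), which is the intended reading of start as a scan position. — e.g. on findNextLocalMinimaMaxima(-2, "DI"): A returns (-1, 0), B returns (1, 2)
import Mathlib
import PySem

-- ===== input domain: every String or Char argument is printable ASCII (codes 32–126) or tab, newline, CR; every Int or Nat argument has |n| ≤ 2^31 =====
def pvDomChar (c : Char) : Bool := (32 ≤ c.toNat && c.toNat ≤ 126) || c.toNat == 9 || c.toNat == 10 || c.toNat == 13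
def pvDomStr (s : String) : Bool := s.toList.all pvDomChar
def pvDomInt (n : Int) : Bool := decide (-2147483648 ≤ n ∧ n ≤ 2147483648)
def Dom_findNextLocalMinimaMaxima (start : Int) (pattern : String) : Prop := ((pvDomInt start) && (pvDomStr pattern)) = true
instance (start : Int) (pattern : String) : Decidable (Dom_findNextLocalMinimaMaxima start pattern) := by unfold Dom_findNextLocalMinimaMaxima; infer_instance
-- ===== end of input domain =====

-- B replaces A's two scanning loops and running accumulators by direct find/rfind searches
-- for the transition indices (objective: simpler); for negative start B clamps to 0 (see D_).


-- ===== PORT A =====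
-- first loop: for i in range(start, len): if p=='D': minima=i+1; if p=='I': maxima=i+1; break
def pvLoop1 (pattern : String) : List Int → Int → Int → Int × Int
  | [], minima, maxima => (minima, maxima)
  | i :: rest, minima, maxima =>
    match PySem.Str.pyGet? pattern i with
    | none => (minima, maxima)   -- IndexError in Python; unreachable under Pre_
    | some p =>
      let minima' := if p = 'D' then i + 1 else minima
      if p = 'I' then (minima', i + 1)
      else pvLoop1 pattern rest minima' maxima

-- second loop: for i in range(maxima, len): if p=='I': maxima=i+1; if p=='D': break
def pvLoop2 (pattern : String) : List Int → Int → Int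
  | [], maxima => maxima
  | i :: rest, maxima =>
    match PySem.Str.pyGet? pattern i with
    | none => maxima   -- IndexError in Python; unreachable under Pre_
    | some p =>
      let maxima' := if p = 'I' then i + 1 else maxima
      if p = 'D' then maxima'
      else pvLoop2 pattern rest maxima'

def findNextLocalMinimaMaxima (start : Int) (pattern : String) : Int × Int :=
  let n : Int := PySem.Str.len pattern
  let r1 := pvLoop1 pattern (PySem.List.pyRange start n 1) start (n + 1)
  let maxima := pvLoop2 pattern (PySem.List.pyRange r1.2 n 1) r1.2
  (r1.1, maxima)

-- ===== PORT B =====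
def findNextLocalMinimaMaxima_alt (start : Int) (pattern : String) : Int × Int :=
  let n : Int := PySem.Str.len pattern
  let s : Int := max start 0
  let j := PySem.Str.findFrom pattern "I" s
  if j = -1 then
    let d := PySem.Str.rfindFrom pattern "D" s
    (if d = -1 then s else d + 1, n + 1)
  else
    let d := PySem.Str.rfindFrom pattern "D" s (some j)
    let minima := if d = -1 then s else d + 1
    let m0 := PySem.Str.findFrom pattern "D" j
    let m := if m0 = -1 then n else m0
    let k := PySem.Str.rfindFrom pattern "I" j (some m)
    (minima, k + 1)

-- ===== PRECONDITION & SPEC =====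
-- Pre_ excludes exactly start < -len(pattern), where A raises IndexError (pattern[i] out of range).
def Pre_findNextLocalMinimaMaxima (start : Int) (pattern : String) : Prop :=
  -(PySem.Str.len pattern) ≤ start
instance (start : Int) (pattern : String) : Decidable (Pre_findNextLocalMinimaMaxima start pattern) := by unfold Pre_findNextLocalMinimaMaxima; infer_instance
def pvWitness_findNextLocalMinimaMaxima : Int × String := (0, "DDIXI")

-- For -len(pattern) <= start < 0, A scans through Python's negative-index wraparound and returns
-- indices derived from the raw negative counter; B clamps start to 0 and returns the actual
-- transition indices, which is the intended reading of start as a scan position.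
def D_findNextLocalMinimaMaxima (start : Int) (pattern : String) : Prop := start < 0
instance (start : Int) (pattern : String) : Decidable (D_findNextLocalMinimaMaxima start pattern) := by unfold D_findNextLocalMinimaMaxima; infer_instance

def Spec_findNextLocalMinimaMaxima (start : Int) (pattern : String) (out : Int × Int) : Prop :=
  ¬ D_findNextLocalMinimaMaxima start pattern → out = findNextLocalMinimaMaxima_alt start pattern
instance (start : Int) (pattern : String) (out : Int × Int) : Decidable (Spec_findNextLocalMinimaMaxima start pattern out) := by unfold Spec_findNextLocalMinimaMaxima; infer_instance

def pvDiffWitness_findNextLocalMinimaMaxima : Int × String := (-2, "DI")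
def pvDiffWitnessOut_findNextLocalMinimaMaxima : (Int × Int) × (Int × Int) := ((-1, 0), (1, 2))

-- ===== CLAIM =====
def Claim_unchanged_findNextLocalMinimaMaxima : Prop := ∀ (start : Int) (pattern : String), Dom_findNextLocalMinimaMaxima start pattern → Pre_findNextLocalMinimaMaxima start pattern → Spec_findNextLocalMinimaMaxima start pattern (findNextLocalMinimaMaxima start pattern)
def Claim_changed_findNextLocalMinimaMaxima : Prop := Dom_findNextLocalMinimaMaxima (pvDiffWitness_findNextLocalMinimaMaxima.1) (pvDiffWitness_findNextLocalMinimaMaxima.2) ∧ Pre_findNextLocalMinimaMaxima (pvDiffWitness_findNextLocalMinimaMaxima.1) (pvDiffWitness_findNextLocalMinimaMaxima.2) ∧ D_findNextLocalMinimaMaxima (pvDiffWitness_findNextLocalMinimaMaxima.1) (pvDiffWitness_findNextLocalMinimaMaxima.2) ∧ findNextLocalMinimaMaxima (pvDiffWitness_findNextLocalMinimaMaxima.1) (pvDiffWitness_findNextLocalMinimaMaxima.2) = pvDiffWitnessOut_findNextLocalMinimaMaxima.1 ∧ findNextLocalMinimaMaxima_alt (pvDiffWitness_findNextLocalMinimaMaxima.1)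 (pvDiffWitness_findNextLocalMinimaMaxima.2) = pvDiffWitnessOut_findNextLocalMinimaMaxima.2 ∧ pvDiffWitnessOut_findNextLocalMinimaMaxima.1 ≠ pvDiffWitnessOut_findNextLocalMinimaMaxima.2
-- ===== LEMMAS AND PROOFS =====

def pvFirst (c : Char) : List Char → Option Nat
  | [] => none
  | x :: xs => if x = c then some 0 else (pvFirst c xs).map (· + 1)

def pvLast (c : Char) : List Char → Option Nat
  | [] => none
  | x :: xs =>
    match pvLast c xs with
    | some k => some (k + 1)
    | none => if x = c then some 0 else none

def pvOptInt (s : Nat) : Option Nat → Int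
  | none => -1
  | some k => ((s + k : Nat) : Int)

theorem pvFirst_eq_none_iff (c : Char) (l : List Char) : pvFirst c l = none ↔ c ∉ l := by
  induction l with
  | nil => simp [pvFirst]
  | cons x xs ih =>
    by_cases h : x = c
    · subst h; simp [pvFirst]
    · simp [pvFirst, h, Option.map_eq_none_iff, ih, Ne.symm h]

theorem pvFirst_some (c : Char) (l : List Char) (k : Nat) (h : pvFirst c l = some k) :
    l[k]? = some c ∧ ∀ i < k, l[i]? ≠ some c := by
  induction l generalizing k with
  | nil => simp [pvFirst] at h
  | cons x xs ih =>
    by_cases hx : x = c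
    · simp [pvFirst, hx] at h; subst h; simp [hx]
    · simp [pvFirst, hx] at h
      obtain ⟨k', hk', rfl⟩ := h
      obtain ⟨h1, h2⟩ := ih k' hk'
      refine ⟨by simpa using h1, ?_⟩
      intro i hi
      cases i with
      | zero => simpa using fun hh => hx hh
      | succ j => simpa using h2 j (by omega)

theorem pvSingleton_prefix_iff (c : Char) (l : List Char) : [c] <+: l ↔ l.head? = some c := by
  cases l with
  | nil => simp
  | cons x xs => simp [List.cons_prefix_cons, eq_comm]

theorem pvSingleton_infix_iff (c : Char) (l : List Char) : [c] <:+: l ↔ c ∈ l := by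
  constructor
  · intro h; exact h.sublist.mem (by simp)
  · intro h
    obtain ⟨a, b, rfl⟩ := List.mem_iff_append.mp h
    exact ⟨a, b, by simp⟩

theorem pvFind_char (c : Char) (l : List Char) :
    PySem.Chars.find l [c] = pvOptInt 0 (pvFirst c l) := by
  cases hf : pvFirst c l with
  | none =>
    have : c ∉ l := (pvFirst_eq_none_iff c l).mp hf
    simp [pvOptInt, (PySem.Chars.find_eq_neg_one_iff l [c]).mpr (by simpa [pvSingleton_infix_iff])]
  | some k =>
    obtain ⟨h1, h2⟩ := pvFirst_some c l k hf
    have hmem : c ∈ l := by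
      rcases List.getElem?_eq_some_iff.mp h1 with ⟨hk, hv⟩
      exact hv ▸ List.getElem_mem hk
    have hne : PySem.Chars.find l [c] ≠ -1 :=
      (PySem.Chars.find_ne_neg_one_iff l [c]).mpr (by simpa [pvSingleton_infix_iff])
    have hge : 0 ≤ PySem.Chars.find l [c] := by
      have := PySem.Chars.neg_one_le_find l [c]; omega
    obtain ⟨hp, hmin⟩ := PySem.Chars.find_spec hge
    have hfv : l[(PySem.Chars.find l [c]).toNat]? = some c := by
      rw [← List.head?_drop]
      exact ((pvSingleton_prefix_iff c _).mp hp) ▸ rfl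
    have hmin' : ∀ i < (PySem.Chars.find l [c]).toNat, l[i]? ≠ some c := by
      intro i hi hv
      exact hmin i hi ((pvSingleton_prefix_iff c _).mpr (by rw [List.head?_drop]; exact hv))
    have hk : (PySem.Chars.find l [c]).toNat = k := by
      rcases Nat.lt_trichotomy (PySem.Chars.find l [c]).toNat k with h | h | h
      · exact absurd hfv (h2 _ h)
      · exact h
      · exact absurd h1 (hmin' _ h)
    simp [pvOptInt, ← hk, Int.toNat_of_nonneg hge]

theorem pvLast_append_singleton (c x : Char) (xs : List Char) :
    pvLast c (xs ++ [x]) = if x = c then some xs.length else pvLast c xs := by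
  induction xs with
  | nil => by_cases h : x = c <;> simp [pvLast, h]
  | cons y ys ih =>
    simp only [List.cons_append, pvLast, ih]
    by_cases h : x = c <;> simp [h]

theorem pvRfindGo_char (c : Char) (l : List Char) :
    ∀ j : Nat, PySem.Chars.rfind.go l [c] j = pvOptInt 0 (pvLast c (l.take (j + 1)))
  | 0 => by
    rw [PySem.Chars.rfind.go]
    cases l with
    | nil => simp [pvLast, pvOptInt, List.isPrefixOf]
    | cons x xs =>
      by_cases h : x = c
      · rw [if_pos (by simp [List.isPrefixOf_iff_prefix, List.cons_prefix_cons, h])]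
        simp [pvLast, pvOptInt, h]
      · have hnp : ¬ ([c] <+: x :: xs) := by
          rw [pvSingleton_prefix_iff]
          simpa using h
        rw [if_neg (by simpa [List.isPrefixOf_iff_prefix] using hnp)]
        simp [pvLast, pvOptInt, h]
  | (j+1) => by
    rw [PySem.Chars.rfind.go]
    by_cases hlen : j + 1 < l.length
    · have hget : l[j+1]? = some l[j+1] := List.getElem?_eq_getElem hlen
      have htake : l.take (j+1+1) = l.take (j+1) ++ [l[j+1]] := by
        rw [List.take_add_one, hget]; rfl
      by_cases hc : l[j+1] = c
      · have hpre : [c] <+: l.drop (j+1) := by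
          rw [pvSingleton_prefix_iff, List.head?_drop, hget, hc]
        rw [if_pos (by simpa [List.isPrefixOf_iff_prefix] using hpre), htake,
          pvLast_append_singleton, if_pos hc]
        simp [pvOptInt, List.length_take, Nat.min_eq_left (le_of_lt hlen)]
      · have hpre : ¬ [c] <+: l.drop (j+1) := by
          rw [pvSingleton_prefix_iff, List.head?_drop, hget]; simpa using hc
        rw [if_neg (by simpa [List.isPrefixOf_iff_prefix] using hpre), htake,
          pvLast_append_singleton, if_neg hc, pvRfindGo_char c l j]
    · have hpre : ¬ [c] <+: l.drop (j+1) := by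
        rw [List.drop_eq_nil_of_le (by omega)]; simp
      rw [if_neg (by simpa [List.isPrefixOf_iff_prefix] using hpre), pvRfindGo_char c l j,
        List.take_of_length_le (by omega), List.take_of_length_le (by omega)]

theorem pvRfind_char (c : Char) (l : List Char) :
    PySem.Chars.rfind l [c] = pvOptInt 0 (pvLast c l) := by
  rw [PySem.Chars.rfind, pvRfindGo_char, List.take_of_length_le (by omega)]

theorem pvOptInt_eq_neg_one (s : Nat) (o : Option Nat) : pvOptInt s o = -1 ↔ o = none := by
  cases o <;> simp [pvOptInt] <;> omega

theorem pvFindFrom_char (c : Char) (l : List Char) (s : Nat) :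
    PySem.Chars.findFrom l [c] (s : Int) none = pvOptInt s (pvFirst c (l.drop s)) := by
  simp only [PySem.Chars.findFrom, if_neg (show ¬((s:Int) < 0) by omega)]
  by_cases h : (l.length : Int) < (s : Int)
  · rw [if_pos h]
    have hd : l.drop s = [] := List.drop_eq_nil_of_le (by exact_mod_cast h.le)
    simp [hd, pvFirst, pvOptInt]
  · rw [if_neg h, Int.toNat_natCast, Int.toNat_natCast, List.take_length, pvFind_char]
    cases hf : pvFirst c (l.drop s) with
    | none => simp [pvOptInt, hf]
    | some k =>
      rw [if_neg (by simp [pvOptInt_eq_neg_one])]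
      simp only [pvOptInt]
      push_cast; ring

theorem pvRfindFrom_none (l sub : List Char) (st : Int) :
    PySem.Chars.rfindFrom l sub st none = PySem.Chars.rfindFrom l sub st (some (l.length : Int)) := by
  simp only [PySem.Chars.rfindFrom, if_neg (show ¬((l.length:Int) < (l.length:Int)) from lt_irrefl _),
    if_neg (show ¬((l.length:Int) < 0) by omega)]

theorem pvRfindFrom_char (c : Char) (l : List Char) (s e : Nat) (he : e ≤ l.length) :
    PySem.Chars.rfindFrom l [c] (s : Int) (some (e : Int)) =
      pvOptInt s (pvLast c ((l.drop s).take (e - s))) := by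
  simp only [PySem.Chars.rfindFrom, if_neg (show ¬((s:Int) < 0) by omega),
    if_neg (show ¬((l.length : Int) < (e : Int)) by exact_mod_cast not_lt.mpr he),
    if_neg (show ¬((e:Int) < 0) by omega)]
  by_cases h : (e : Int) < (s : Int)
  · rw [if_pos h]
    have : e - s = 0 := by omega
    simp [this, pvLast, pvOptInt]
  · rw [if_neg h, Int.toNat_natCast, Int.toNat_natCast, List.drop_take, pvRfind_char]
    cases hf : pvLast c ((l.drop s).take (e - s)) with
    | none => simp [pvOptInt, hf]
    | some k =>
      rw [if_neg (by simp [pvOptInt_eq_neg_one])]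
      simp only [pvOptInt]
      push_cast; ring

def pvMinOut (s : Nat) (m0 : Int) (o : Option Nat) : Int :=
  o.elim m0 (fun u => ((s + u + 1 : Nat) : Int))

def pvMaxOut (s : Nat) (mx0 : Int) (o : Option Nat) : Int :=
  o.elim mx0 (fun t => ((s + t + 1 : Nat) : Int))

theorem pvLoop1_eq (pattern : String) :
    ∀ (k s : Nat), pattern.toList.length ≤ s + k → ∀ (m0 mx0 : Int),
    pvLoop1 pattern (PySem.List.pyRange (s : Int) (pattern.toList.length : Int) 1) m0 mx0 =
      (pvMinOut s m0 (pvLast 'D' ((pattern.toList.drop s).take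
          ((pvFirst 'I' (pattern.toList.drop s)).getD (pattern.toList.drop s).length))),
       pvMaxOut s mx0 (pvFirst 'I' (pattern.toList.drop s)))
  | 0, s, hs, m0, mx0 => by
    have hd : pattern.toList.drop s = [] := List.drop_eq_nil_of_le (by omega)
    rw [PySem.List.pyRange_one_eq_nil (by exact_mod_cast (show pattern.toList.length ≤ s by omega))]
    simp [pvLoop1, hd, pvFirst, pvLast, pvMinOut, pvMaxOut]
  | (k+1), s, hs, m0, mx0 => by
    by_cases hns : pattern.toList.length ≤ s
    · have hd : pattern.toList.drop s = [] := List.drop_eq_nil_of_le hns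
      rw [PySem.List.pyRange_one_eq_nil (by exact_mod_cast hns)]
      simp [pvLoop1, hd, pvFirst, pvLast, pvMinOut, pvMaxOut]
    · have hlt : s < pattern.toList.length := by omega
      rw [PySem.List.pyRange_one_cons (by exact_mod_cast hlt)]
      have hget : PySem.Str.pyGet? pattern (s : Int) = some pattern.toList[s] := by
        rw [PySem.Str.pyGet?_natCast]; exact List.getElem?_eq_getElem hlt
      have hds : pattern.toList.drop s = pattern.toList[s] :: pattern.toList.drop (s+1) :=
        List.drop_eq_getElem_cons hlt
      rw [show ((s : Int) + 1) = ((s + 1 : Nat) : Int) by push_cast; omega] at *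
      simp only [pvLoop1, hget, hds]
      by_cases hI : pattern.toList[s] = 'I'
      · rw [hI]
        simp [pvFirst, pvLast, pvMinOut, pvMaxOut, show ¬ ('I' = 'D') by decide]
        all_goals (push_cast; omega)
      · by_cases hD : pattern.toList[s] = 'D'
        · rw [hD]
          rw [if_neg (by decide), if_pos rfl]
          rw [show ((s : Int) + 1) = ((s + 1 : Nat) : Int) by push_cast; omega]
          rw [pvLoop1_eq pattern k (s+1) (by omega) ((s+1 : Nat) : Int) mx0]
          simp only [pvFirst, if_neg (show ¬ ('D' = 'I') by decide)]
          cases hf : pvFirst 'I' (pattern.toList.drop (s+1)) with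
          | none =>
            simp only [hf, Option.map_none, Option.getD_none]
            rw [List.take_of_length_le (by simp), List.take_of_length_le (by simp)]
            simp only [pvLast]
            cases hpl : pvLast 'D' (pattern.toList.drop (s+1)) with
            | none =>
              simp [pvMinOut, pvMaxOut]
              all_goals (push_cast; omega)
            | some u =>
              simp [pvMinOut, pvMaxOut]
              all_goals (push_cast; omega)
          | some t =>
            simp only [hf, Option.map_some, Option.getD_some, List.length_cons, List.take_succ_cons]
            simp only [pvLast]
            cases hpl : pvLast 'D' ((pattern.toList.drop (s+1)).take t) with
            | none =>
              simp [pvMinOut, pvMaxOut]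
              all_goals (push_cast; omega)
            | some u =>
              simp [pvMinOut, pvMaxOut]
              all_goals (push_cast; omega)
        · rw [if_neg hD, if_neg hI]
          rw [pvLoop1_eq pattern k (s+1) (by omega) m0 mx0]
          simp only [pvFirst, if_neg hI]
          cases hf : pvFirst 'I' (pattern.toList.drop (s+1)) with
          | none =>
            simp only [hf, Option.map_none, Option.getD_none]
            rw [List.take_of_length_le (by simp), List.take_of_length_le (by simp)]
            simp only [pvLast]
            cases hpl : pvLast 'D' (pattern.toList.drop (s+1)) with
            | none =>
              simp [hD, pvMinOut, pvMaxOut]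
              all_goals (push_cast; omega)
            | some u =>
              simp [pvMinOut, pvMaxOut]
              all_goals (push_cast; omega)
          | some t =>
            simp only [hf, Option.map_some, Option.getD_some, List.length_cons, List.take_succ_cons]
            simp only [pvLast]
            cases hpl : pvLast 'D' ((pattern.toList.drop (s+1)).take t) with
            | none =>
              simp [hD, pvMinOut, pvMaxOut]
              all_goals (push_cast; omega)
            | some u =>
              simp [pvMinOut, pvMaxOut]
              all_goals (push_cast; omega)

theorem pvLoop2_eq (pattern : String) :
    ∀ (k q : Nat), pattern.toList.length ≤ q + k → ∀ (mx : Int),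
    pvLoop2 pattern (PySem.List.pyRange (q : Int) (pattern.toList.length : Int) 1) mx =
      pvMaxOut q mx (pvLast 'I' ((pattern.toList.drop q).take
        ((pvFirst 'D' (pattern.toList.drop q)).getD (pattern.toList.drop q).length)))
  | 0, q, hq, mx => by
    have hd : pattern.toList.drop q = [] := List.drop_eq_nil_of_le (by omega)
    rw [PySem.List.pyRange_one_eq_nil (by exact_mod_cast (show pattern.toList.length ≤ q by omega))]
    simp [pvLoop2, hd, pvFirst, pvLast, pvMaxOut]
  | (k+1), q, hq, mx => by
    by_cases hns : pattern.toList.length ≤ q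
    · have hd : pattern.toList.drop q = [] := List.drop_eq_nil_of_le hns
      rw [PySem.List.pyRange_one_eq_nil (by exact_mod_cast hns)]
      simp [pvLoop2, hd, pvFirst, pvLast, pvMaxOut]
    · have hlt : q < pattern.toList.length := by omega
      rw [PySem.List.pyRange_one_cons (by exact_mod_cast hlt)]
      have hget : PySem.Str.pyGet? pattern (q : Int) = some pattern.toList[q] := by
        rw [PySem.Str.pyGet?_natCast]; exact List.getElem?_eq_getElem hlt
      have hds : pattern.toList.drop q = pattern.toList[q] :: pattern.toList.drop (q+1) :=
        List.drop_eq_getElem_cons hlt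
      simp only [pvLoop2, hget, hds]
      by_cases hD : pattern.toList[q] = 'D'
      · rw [hD]
        simp [pvFirst, pvLast, pvMinOut, pvMaxOut, show ¬ ('D' = 'I') by decide]
      · by_cases hI : pattern.toList[q] = 'I'
        · rw [hI]
          rw [if_pos rfl, if_neg (by decide)]
          rw [show ((q : Int) + 1) = ((q + 1 : Nat) : Int) by push_cast; omega]
          rw [pvLoop2_eq pattern k (q+1) (by omega) ((q+1 : Nat) : Int)]
          simp only [pvFirst, if_neg (show ¬ ('I' = 'D') by decide)]
          cases hf : pvFirst 'D' (pattern.toList.drop (q+1)) with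
          | none =>
            simp only [hf, Option.map_none, Option.getD_none]
            rw [List.take_of_length_le (by simp), List.take_of_length_le (by simp)]
            simp only [pvLast]
            cases hpl : pvLast 'I' (pattern.toList.drop (q+1)) with
            | none =>
              simp [pvMinOut, pvMaxOut]
              all_goals (push_cast; omega)
            | some u =>
              simp [pvMinOut, pvMaxOut]
              all_goals (push_cast; omega)
          | some t =>
            simp only [hf, Option.map_some, Option.getD_some, List.length_cons, List.take_succ_cons]
            simp only [pvLast]
            cases hpl : pvLast 'I' ((pattern.toList.drop (q+1)).take t) with
            | none =>
              simp [pvMinOut, pvMaxOut]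
              all_goals (push_cast; omega)
            | some u =>
              simp [pvMinOut, pvMaxOut]
              all_goals (push_cast; omega)
        · rw [if_neg hI, if_neg hD]
          rw [show ((q : Int) + 1) = ((q + 1 : Nat) : Int) by push_cast; omega]
          rw [pvLoop2_eq pattern k (q+1) (by omega) mx]
          simp only [pvFirst, if_neg hD]
          cases hf : pvFirst 'D' (pattern.toList.drop (q+1)) with
          | none =>
            simp only [hf, Option.map_none, Option.getD_none]
            rw [List.take_of_length_le (by simp), List.take_of_length_le (by simp)]
            simp only [pvLast]
            cases hpl : pvLast 'I' (pattern.toList.drop (q+1)) with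
            | none =>
              simp [hI, pvMinOut, pvMaxOut]
              all_goals (push_cast; omega)
            | some u =>
              simp [pvMinOut, pvMaxOut]
              all_goals (push_cast; omega)
          | some t =>
            simp only [hf, Option.map_some, Option.getD_some, List.length_cons, List.take_succ_cons]
            simp only [pvLast]
            cases hpl : pvLast 'I' ((pattern.toList.drop (q+1)).take t) with
            | none =>
              simp [hI, pvMinOut, pvMaxOut]
              all_goals (push_cast; omega)
            | some u =>
              simp [pvMinOut, pvMaxOut]
              all_goals (push_cast; omega)

theorem pvMain (start : Int) (pattern : String) (h0 : 0 ≤ start) :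
    findNextLocalMinimaMaxima start pattern = findNextLocalMinimaMaxima_alt start pattern := by
  obtain ⟨s, rfl⟩ : ∃ s : Nat, start = (s : Int) := ⟨start.toNat, (Int.toNat_of_nonneg h0).symm⟩
  have hImono : ("I" : String).toList = ['I'] := rfl
  have hDmono : ("D" : String).toList = ['D'] := rfl
  have hmax : max ((s : Nat) : Int) 0 = (s : Int) := by omega
  simp only [findNextLocalMinimaMaxima, findNextLocalMinimaMaxima_alt, PySem.Str.len_eq,
    PySem.Str.findFrom_eq, PySem.Str.rfindFrom_eq, hImono, hDmono, hmax]
  rw [pvLoop1_eq pattern pattern.toList.length s (by omega)]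
  rw [pvFindFrom_char]
  cases hf : pvFirst 'I' (pattern.toList.drop s) with
  | none =>
    simp only [pvMinOut, pvMaxOut, Option.elim_none, Option.getD_none]
    rw [if_pos (by simp [pvOptInt])]
    rw [pvRfindFrom_none, pvRfindFrom_char 'D' pattern.toList s pattern.toList.length le_rfl]
    have htake : (pattern.toList.drop s).take (pattern.toList.length - s) = pattern.toList.drop s := by
      apply List.take_of_length_le; simp
    have htake2 : (pattern.toList.drop s).take (pattern.toList.drop s).length
        = pattern.toList.drop s := List.take_length ..
    rw [htake, htake2]
    rw [PySem.List.pyRange_one_eq_nil (by omega)]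
    simp only [pvLoop2]
    cases hl : pvLast 'D' (pattern.toList.drop s) with
    | none => simp [pvOptInt]
    | some u =>
      rw [if_neg (by simp [pvOptInt_eq_neg_one])]
      simp [pvOptInt, Prod.ext_iff] <;> (push_cast; omega)
  | some t =>
    have hts := pvFirst_some 'I' (pattern.toList.drop s) t hf
    have htlen : t < (pattern.toList.drop s).length := by
      rcases List.getElem?_eq_some_iff.mp hts.1 with ⟨h, _⟩; exact h
    have hstn : s + t < pattern.toList.length := by
      have h2 := htlen; simp only [List.length_drop] at h2; omega
    have hgetI : pattern.toList[s+t]? = some 'I' := by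
      rw [← List.getElem?_drop]; exact hts.1
    simp only [pvMinOut, pvMaxOut, Option.elim_some, Option.getD_some]
    rw [if_neg (by simp [pvOptInt_eq_neg_one])]
    simp only [pvOptInt]
    rw [pvRfindFrom_char 'D' pattern.toList s (s + t) (by omega)]
    have hnat1 : s + t - s = t := by omega
    rw [hnat1]
    have hdq : pattern.toList.drop (s+t) = 'I' :: pattern.toList.drop (s+t+1) := by
      rw [List.drop_eq_getElem_cons hstn]
      congr 1
      have h3 := List.getElem?_eq_getElem hstn
      rw [h3] at hgetI; exact Option.some.inj hgetI
    rw [pvFindFrom_char, hdq]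
    rw [pvLoop2_eq pattern pattern.toList.length (s+t+1) (by omega)]
    rw [Prod.mk.injEq]
    refine ⟨?_, ?_⟩
    · cases hl : pvLast 'D' ((pattern.toList.drop s).take t) with
      | none => simp [pvOptInt]
      | some u =>
        rw [if_neg (by simp [pvOptInt_eq_neg_one])]
        simp [pvOptInt] <;> (push_cast; omega)
    · simp only [pvFirst, if_neg (show ¬ ('I' = 'D') from by decide)]
      cases hg : pvFirst 'D' (pattern.toList.drop (s+t+1)) with
      | none =>
        simp only [Option.map_none, Option.getD_none]
        rw [if_pos (by simp [pvOptInt])]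
        rw [pvRfindFrom_char 'I' pattern.toList (s+t) pattern.toList.length le_rfl]
        have htk : (pattern.toList.drop (s+t)).take (pattern.toList.length - (s+t))
            = pattern.toList.drop (s+t) := by apply List.take_of_length_le; simp
        rw [htk, hdq]
        simp only [pvLast]
        have htk2 : (pattern.toList.drop (s+t+1)).take ((pattern.toList.drop (s+t+1)).length)
            = pattern.toList.drop (s+t+1) := List.take_length ..
        rw [htk2]
        cases hl : pvLast 'I' (pattern.toList.drop (s+t+1)) with
        | none => simp [pvOptInt, pvMaxOut] <;> (push_cast; omega)
        | some u => simp [pvOptInt, pvMaxOut] <;> (push_cast; omega)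
      | some v =>
        have hvs := pvFirst_some 'D' (pattern.toList.drop (s+t+1)) v hg
        have hvlen : v < (pattern.toList.drop (s+t+1)).length := by
          rcases List.getElem?_eq_some_iff.mp hvs.1 with ⟨h, _⟩; exact h
        have hvn : s + t + 1 + v < pattern.toList.length := by
          have h4 := hvlen; simp only [List.length_drop] at h4; omega
        simp only [Option.map_some, Option.getD_some, reduceIte]
        rw [if_neg (by simp [pvOptInt_eq_neg_one])]
        simp only [pvOptInt]
        rw [pvRfindFrom_char 'I' pattern.toList (s+t) (s+t+(v+1)) (by omega)]
        have hnat2 : s + t + (v+1) - (s+t) = v + 1 := by omega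
        rw [hnat2, hdq, List.take_succ_cons]
        simp only [pvLast]
        cases hl : pvLast 'I' ((pattern.toList.drop (s+t+1)).take v) with
        | none => simp [pvOptInt, pvMaxOut] <;> (push_cast; omega)
        | some u => simp [pvOptInt, pvMaxOut] <;> (push_cast; omega)

-- ===== VERDICT =====
theorem findNextLocalMinimaMaxima_spec : Claim_unchanged_findNextLocalMinimaMaxima := by
  intro start pattern _ _
  unfold Spec_findNextLocalMinimaMaxima
  intro hnd
  exact pvMain start pattern (by unfold D_findNextLocalMinimaMaxima at hnd; omega)
theorem findNextLocalMinimaMaxima_changed : Claim_changed_findNextLocalMinimaMaxima := by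
  unfold Claim_changed_findNextLocalMinimaMaxima; decide
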